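-- pv_equiv track=rewrite | github.com/xyleth/desloppify | desloppify/detectors/test_coverage_mapping.py | _strip_py_comment
-- ===== SOURCE A (Python) =====
-- def _strip_py_comment(line: str) -> str:
--     """Strip Python # comments while respecting string literals."""
--     in_str = None
--     for i, ch in enumerate(line):
--         if in_str:
--             if ch == '\\' and i + 1 < len(line):
--                 continue  # skip escaped char (next iteration handles it)
--             if ch == in_str:
--                 in_str = None
--         elif ch in ('"', "'"):
--             in_str = ch
--         elif ch == '#' and not in_str:
--             return line[:i]
--     return line
-- ===== SOURCE B (Python) =====
-- def _strip_py_comment(line: str) -> str: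
--     out = []
--     it = iter(line)
--     for ch in it:
--         if ch == '#':
--             return ''.join(out)
--         out.append(ch)
--         if ch in ('"', "'"):
--             for c in it:
--                 out.append(c)
--                 if c == ch:
--                     break
--     return ''.join(out)
-- ===== Notes on version B (the rewrite author's own statement) =====
-- stated objective: alternative
-- what changed: A's single pass keeps an index plus an in_str flag and slices line[:i] at a comment; B has no flag or index: nested consumer loops over one shared iterator, an inner loop swallowing each string literal to its closing quote, building the output prefix directly.
import Mathlib
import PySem

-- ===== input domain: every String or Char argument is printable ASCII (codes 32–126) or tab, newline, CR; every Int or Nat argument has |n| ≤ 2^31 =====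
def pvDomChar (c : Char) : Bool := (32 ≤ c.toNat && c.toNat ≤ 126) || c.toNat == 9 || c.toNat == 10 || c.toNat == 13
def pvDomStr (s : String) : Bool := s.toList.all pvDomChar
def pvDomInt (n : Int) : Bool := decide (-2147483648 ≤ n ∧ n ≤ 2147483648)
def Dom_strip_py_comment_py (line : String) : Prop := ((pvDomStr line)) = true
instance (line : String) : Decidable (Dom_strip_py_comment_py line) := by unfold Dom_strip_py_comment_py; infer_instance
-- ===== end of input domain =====

-- B replaces A's per-character index/in_str state machine with nested consumer loops over one
-- iterator that build the output prefix directly (objective: simpler decomposition, not faster).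

-- ===== PORT A =====
-- the for-loop over enumerate(line): cs = remaining chars, i = current index, instr = in_str.
-- line[:i] with 0 ≤ i ≤ len(line) is List.take i.
def stripALoop (line : List Char) : List Char → Nat → Option Char → List Char
  | [], _, _ => line
  | ch :: rest, i, instr =>
    match instr with
    | some q =>
      if ch = '\\' ∧ i + 1 < line.length then stripALoop line rest (i+1) (some q)
      else if ch = q then stripALoop line rest (i+1) none
      else stripALoop line rest (i+1) (some q)
    | none =>
      if ch = '"' ∨ ch = '\'' then stripALoop line rest (i+1) (some ch)
      else if ch = '#' then line.take i
      else stripALoop line rest (i+1) none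

def strip_py_comment_py (line : String) : String :=
  String.ofList (stripALoop line.toList line.toList 0 none)

-- ===== PORT B =====
-- inner `for c in it: out.append(c); if c == ch: break` — returns (out, remaining iterator)
def stripBInner (q : Char) : List Char → List Char → List Char × List Char
  | out, [] => (out, [])
  | out, c :: rest => if c = q then (out ++ [c], rest) else stripBInner q (out ++ [c]) rest

theorem stripBInner_snd_length (q : Char) : ∀ (out cs : List Char),
    (stripBInner q out cs).2.length ≤ cs.length := by
  intro out cs
  induction cs generalizing out with
  | nil => simp [stripBInner]
  | cons c rest ih =>
    simp only [stripBInner]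
    split
    · simp
    · exact le_trans (ih _) (by simp)

-- outer `for ch in it`: out = accumulated output, second arg = remaining iterator
def stripBOuter : List Char → List Char → List Char
  | out, [] => out
  | out, ch :: rest =>
    if ch = '#' then out
    else if ch = '"' ∨ ch = '\'' then
      let p := stripBInner ch (out ++ [ch]) rest
      stripBOuter p.1 p.2
    else stripBOuter (out ++ [ch]) rest
termination_by _ cs => cs.length
decreasing_by
  · have := stripBInner_snd_length ch (out ++ [ch]) rest
    simp; omega
  · simp

def strip_py_comment_py_alt (line : String) : String :=
  String.ofList (stripBOuter [] line.toList)

-- ===== PRECONDITION & SPEC =====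
def Spec_strip_py_comment_py (line : String) (out : String) : Prop := out = strip_py_comment_py_alt line
instance (line : String) (out : String) : Decidable (Spec_strip_py_comment_py line out) := by unfold Spec_strip_py_comment_py; infer_instance

-- ===== CLAIM (what is proved, stated in full; the proofs are below) =====
def Claim_equal_strip_py_comment_py : Prop := ∀ (line : String), Dom_strip_py_comment_py line → Spec_strip_py_comment_py line (strip_py_comment_py line)

-- ===== LEMMAS AND PROOFS =====

-- Inside a string, A's loop consumes characters until the matching quote (the backslash branch
-- is a no-op since q is a quote, never a backslash): it lands exactly where stripBInner lands.
theorem stripA_some (full : List Char) (q : Char) (hq : q ≠ '\\') :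
    ∀ (cs out : List Char), full = out ++ cs →
      full = (stripBInner q (out) cs).1 ++ (stripBInner q out cs).2 ∧
      stripALoop full cs out.length (some q) =
        stripALoop full (stripBInner q out cs).2 (stripBInner q out cs).1.length none := by
  intro cs
  induction cs with
  | nil =>
    intro out h
    simpa [stripBInner, stripALoop] using h
  | cons c rest ih =>
    intro out h
    simp only [stripBInner]
    by_cases hc : c = q
    · subst hc
      constructor
      · simpa using h
      · simp only [stripALoop]
        split
        next hcond => exact absurd hcond.1 hq
        · simp
    · have h' : full = (out ++ [c]) ++ rest := by simpa using h
      have := ih (out ++ [c]) h'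
      refine ⟨by simpa [hc] using this.1, ?_⟩
      simp only [stripALoop]
      split
      · simpa [hc] using this.2
      · simpa [hc] using this.2

theorem stripA_eq_stripB (full : List Char) :
    ∀ (n : Nat) (cs out : List Char), cs.length ≤ n → full = out ++ cs →
      stripALoop full cs out.length none = stripBOuter out cs := by
  intro n
  induction n with
  | zero =>
    intro cs out hn h
    have : cs = [] := List.eq_nil_of_length_eq_zero (Nat.le_zero.mp hn)
    subst this
    simpa [stripALoop, stripBOuter] using h
  | succ n ih =>
    intro cs out hn h
    match cs with
    | [] => simpa [stripALoop, stripBOuter] using h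
    | ch :: rest =>
      simp only [stripALoop, stripBOuter]
      by_cases hq : ch = '"' ∨ ch = '\''
      · have hch : ¬ ch = '#' := by rcases hq with rfl | rfl <;> decide
        have hbs : ch ≠ '\\' := by rcases hq with rfl | rfl <;> decide
        simp only [if_neg hch, if_pos hq]
        have h' : full = (out ++ [ch]) ++ rest := by simpa using h
        obtain ⟨hsplit, heq⟩ := stripA_some full ch hbs rest (out ++ [ch]) h'
        have hlen : (stripBInner ch (out ++ [ch]) rest).2.length ≤ rest.length :=
          stripBInner_snd_length ch (out ++ [ch]) rest
        have := ih (stripBInner ch (out ++ [ch]) rest).2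
          (stripBInner ch (out ++ [ch]) rest).1
          (by simp at hn; omega) hsplit
        simpa using heq.trans this
      · simp only [if_neg hq]
        by_cases hh : ch = '#'
        · subst hh
          simp [h]
        · simp only [if_neg hh]
          have h' : full = (out ++ [ch]) ++ rest := by simpa using h
          have := ih rest (out ++ [ch]) (by simp at hn ⊢; omega) h'
          simpa using this

-- ===== VERDICT (by name: the statement is the Claim_ definition above) =====
theorem strip_py_comment_py_spec : Claim_equal_strip_py_comment_py := by
  intro line _
  unfold Spec_strip_py_comment_py strip_py_comment_py strip_py_comment_py_alt
  have := stripA_eq_stripB line.toList line.toList.length line.toList [] le_rfl (by simp)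
  simpa using congrArg String.ofList this
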